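-- pv_equiv track=rewrite | github.com/floormatgen/2026-recruitment-technical-assessment | backend/py_template/devdonalds.py | parse_handwriting
-- ===== SOURCE A (Python) =====
-- from typing import Union, Final, Any
--
-- def parse_handwriting(recipeName: str) -> Union[str, None]:
-- 	res: str = ""
-- 	requires_capital: bool = True
--
-- 	char_code_a: Final[int] = ord('a')
-- 	char_code_z: Final[int] = ord('z')
-- 	char_code_A: Final[int] = ord('A')
-- 	char_code_Z: Final[int] = ord('Z')
-- 	difference: Final[int] = char_code_a - char_code_A
--
-- 	for c in recipeName:
-- 		char_code = ord(c)
--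
-- 		if c == ' ' or c == '-' or c == '_':
-- 			res += ' '
-- 			requires_capital = True
-- 			continue
--
-- 		if char_code_a <= char_code and char_code <= char_code_z:
-- 			if requires_capital:
-- 				res += chr(char_code - difference)
-- 				requires_capital = False
-- 			else:
-- 				res += c
-- 			continue
--
-- 		if char_code_A <= char_code and char_code <= char_code_Z:
-- 			if requires_capital:
-- 				res += c
-- 				requires_capital = False
-- 			else:
-- 				res += chr(char_code + difference)
-- 			continue
--
-- 	if len(res) > 0:
-- 		return res
-- 	else:
-- 		return None
-- ===== SOURCE B (Python) =====
-- def parse_handwriting(recipeName):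
--     filtered = ''.join(
--         ' ' if c in ' -_' else c
--         for c in recipeName
--         if c in ' -_' or 'a' <= c <= 'z' or 'A' <= c <= 'Z')
--     return filtered.title() or None
-- ===== Notes on version B (the rewrite author's own statement) =====
-- stated objective: idiomatic
-- what changed: Replaced A's explicit requires_capital state machine with a one-pass filter/map to a letters-and-spaces string followed by str.title() (word-boundary capitalization), returning it or None if empty.
import Mathlib
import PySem

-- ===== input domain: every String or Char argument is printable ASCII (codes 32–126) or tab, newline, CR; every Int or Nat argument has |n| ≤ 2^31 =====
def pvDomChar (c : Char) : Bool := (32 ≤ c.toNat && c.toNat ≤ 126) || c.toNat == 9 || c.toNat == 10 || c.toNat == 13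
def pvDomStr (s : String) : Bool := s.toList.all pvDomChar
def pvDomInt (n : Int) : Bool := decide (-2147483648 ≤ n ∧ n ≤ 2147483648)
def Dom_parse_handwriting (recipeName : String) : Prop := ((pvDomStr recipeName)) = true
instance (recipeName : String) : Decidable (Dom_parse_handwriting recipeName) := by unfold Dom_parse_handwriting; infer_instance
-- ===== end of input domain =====

-- B replaces A's explicit requires_capital state machine by a one-pass filter/map to letters-and-spaces
-- followed by str.title(); objective: idiomatic, same O(n) cost.

-- ===== PORT A =====
def pvStepA (st : List Char × Bool) (c : Char) : List Char × Bool :=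
  if c = ' ' ∨ c = '-' ∨ c = '_' then (st.1 ++ [' '], true)
  else if 'a' ≤ c ∧ c ≤ 'z' then
    if st.2 then (st.1 ++ [Char.ofNat (c.toNat - 32)], false) else (st.1 ++ [c], false)
  else if 'A' ≤ c ∧ c ≤ 'Z' then
    if st.2 then (st.1 ++ [c], false) else (st.1 ++ [Char.ofNat (c.toNat + 32)], false)
  else st

def parse_handwriting (recipeName : String) : Option String :=
  let res := recipeName.toList.foldl pvStepA ([], true)
  if res.1.length > 0 then some (String.ofList res.1) else none

-- ===== PORT B =====
def pvFilterMapB (c : Char) : Option Char :=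
  if c = ' ' ∨ c = '-' ∨ c = '_' then some ' '
  else if ('a' ≤ c ∧ c ≤ 'z') ∨ ('A' ≤ c ∧ c ≤ 'Z') then some c
  else none

-- hand port of Python's str.title(); exact on the ASCII letters-and-spaces strings B applies it to
def pvTitleB : List Char → Bool → List Char
  | [], _ => []
  | c :: cs, b =>
    if ('a' ≤ c ∧ c ≤ 'z') ∨ ('A' ≤ c ∧ c ≤ 'Z') then
      (if b then (if 'a' ≤ c ∧ c ≤ 'z' then Char.ofNat (c.toNat - 32) else c)
       else (if 'A' ≤ c ∧ c ≤ 'Z' then Char.ofNat (c.toNat + 32) else c)) :: pvTitleB cs false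
    else c :: pvTitleB cs true

def parse_handwriting_alt (recipeName : String) : Option String :=
  let t := pvTitleB (recipeName.toList.filterMap pvFilterMapB) true
  if t.isEmpty then none else some (String.ofList t)

-- ===== PRECONDITION & SPEC =====
def Spec_parse_handwriting (recipeName : String) (out : Option String) : Prop := out = parse_handwriting_alt recipeName
instance (recipeName : String) (out : Option String) : Decidable (Spec_parse_handwriting recipeName out) := by unfold Spec_parse_handwriting; infer_instance

-- ===== CLAIM (what is proved, stated in full; the proofs are below) =====
def Claim_equal_parse_handwriting : Prop := ∀ (recipeName : String), Dom_parse_handwriting recipeName → Spec_parse_handwriting recipeName (parse_handwriting recipeName)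

-- ===== LEMMAS AND PROOFS =====

theorem pvKey : ∀ (cs : List Char) (res : List Char) (cap : Bool),
    (List.foldl pvStepA (res, cap) cs).1 = res ++ pvTitleB (cs.filterMap pvFilterMapB) cap := by
  intro cs
  induction cs with
  | nil => intro res cap; simp [pvTitleB]
  | cons c cs ih =>
    intro res cap
    rw [List.foldl_cons, List.filterMap_cons]
    by_cases hsep : c = ' ' ∨ c = '-' ∨ c = '_'
    · rw [show pvStepA (res, cap) c = (res ++ [' '], true) from by
          simp only [pvStepA]; rw [if_pos hsep],
        show pvFilterMapB c = some ' ' from by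
          simp only [pvFilterMapB]; rw [if_pos hsep],
        ih,
        show pvTitleB (' ' :: cs.filterMap pvFilterMapB) cap
            = ' ' :: pvTitleB (cs.filterMap pvFilterMapB) true from by
          rw [pvTitleB, if_neg (by decide)]]
      simp
    · by_cases hlo : 'a' ≤ c ∧ c ≤ 'z'
      · have hnup : ¬ ('A' ≤ c ∧ c ≤ 'Z') := fun h => absurd (le_trans hlo.1 h.2) (by decide)
        rw [show pvStepA (res, cap) c
            = (if cap then (res ++ [Char.ofNat (c.toNat - 32)], false) else (res ++ [c], false)) from by
            simp only [pvStepA]; rw [if_neg hsep, if_pos hlo],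
          show pvFilterMapB c = some c from by
            simp only [pvFilterMapB]; rw [if_neg hsep, if_pos (Or.inl hlo)],
          show pvTitleB (c :: cs.filterMap pvFilterMapB) cap
              = (if cap then (if 'a' ≤ c ∧ c ≤ 'z' then Char.ofNat (c.toNat - 32) else c)
                 else (if 'A' ≤ c ∧ c ≤ 'Z' then Char.ofNat (c.toNat + 32) else c))
                :: pvTitleB (cs.filterMap pvFilterMapB) false from by
            rw [pvTitleB, if_pos (Or.inl hlo)],
          if_pos hlo, if_neg hnup]
        cases cap with
        | true => rw [if_pos rfl, if_pos rfl, ih]; simp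
        | false => rw [if_neg Bool.false_ne_true, if_neg Bool.false_ne_true, ih]; simp
      · by_cases hup : 'A' ≤ c ∧ c ≤ 'Z'
        · rw [show pvStepA (res, cap) c
              = (if cap then (res ++ [c], false) else (res ++ [Char.ofNat (c.toNat + 32)], false)) from by
              simp only [pvStepA]; rw [if_neg hsep, if_neg hlo, if_pos hup],
            show pvFilterMapB c = some c from by
              simp only [pvFilterMapB]; rw [if_neg hsep, if_pos (Or.inr hup)],
            show pvTitleB (c :: cs.filterMap pvFilterMapB) cap
                = (if cap then (if 'a' ≤ c ∧ c ≤ 'z' then Char.ofNat (c.toNat - 32) else c)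
                   else (if 'A' ≤ c ∧ c ≤ 'Z' then Char.ofNat (c.toNat + 32) else c))
                  :: pvTitleB (cs.filterMap pvFilterMapB) false from by
              rw [pvTitleB, if_pos (Or.inr hup)],
            if_neg hlo, if_pos hup]
          cases cap with
          | true => rw [if_pos rfl, if_pos rfl, ih]; simp
          | false => rw [if_neg Bool.false_ne_true, if_neg Bool.false_ne_true, ih]; simp
        · rw [show pvStepA (res, cap) c = (res, cap) from by
              simp only [pvStepA]; rw [if_neg hsep, if_neg hlo, if_neg hup],
            show pvFilterMapB c = none from by
              simp only [pvFilterMapB]; rw [if_neg hsep, if_neg (by tauto)],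
            ih]

-- ===== VERDICT (by name: the statement is the Claim_ definition above) =====
theorem parse_handwriting_spec : Claim_equal_parse_handwriting := by
  intro s _
  unfold Spec_parse_handwriting
  show parse_handwriting s = parse_handwriting_alt s
  simp only [parse_handwriting, parse_handwriting_alt, pvKey, List.nil_append]
  simp [List.isEmpty_iff, List.length_pos_iff]
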